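-- pv_equiv track=rewrite | github.com/MrBrantCode/unitest_baseline | mut_generate/mist_train_taco/taco_19179/solution.py | calculate_minimum_cost
-- ===== SOURCE A (Python) =====
-- def calculate_minimum_cost(N, ingredients, M, magic_transformations):
--     # Create a dictionary to map ingredient names to their indices
--     dic = {ingredient[0]: idx for idx, ingredient in enumerate(ingredients)}
--
--     # Extract prices into a list
--     price = [ingredient[1] for ingredient in ingredients]
--
--     # Initialize parent array for union-find
--     parent = [i for i in range(N)]
--
--     # Find function for union-find
--     def find(x):
--         if parent[x] == x:
--             return x
--         parent[x] = find(parent[x])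
--         return parent[x]
--
--     # Apply magic transformations
--     for s, t in magic_transformations:
--         si, ti = dic[s], dic[t]
--         ps, pt = find(si), find(ti)
--         parent[ps] = pt
--
--     # Group ingredients by their root parent and find the minimum price in each group
--     groups = {}
--     for i in range(N):
--         root = find(i)
--         if root in groups:
--             min_price, cnt = groups[root]
--             groups[root] = (min(min_price, price[i]), cnt + 1)
--         else:
--             groups[root] = (price[i], 1)
--
--     # Calculate the total minimum cost
--     total_cost = sum(v[0] * v[1] for _, v in groups.items())
--
--     return total_cost
-- ===== SOURCE B (Python) =====
-- def calculate_minimum_cost(N, ingredients, M, magic_transformations):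
--     # Map names to indices (last occurrence wins, like a dict comprehension)
--     dic = {ingredient[0]: idx for idx, ingredient in enumerate(ingredients)}
--     price = [ingredient[1] for ingredient in ingredients]
--
--     # Component labels: start with each node in its own component, and for
--     # every transformation merge the two components by relabelling.
--     comp = list(range(N))
--     for s, t in magic_transformations:
--         cs, ct = comp[dic[s]], comp[dic[t]]
--         comp = [ct if c == cs else c for c in comp]
--
--     # Each node contributes the minimum price of its component.
--     total = 0
--     for i in range(N):
--         m = price[i]
--         for j in range(N):
--             if comp[j] == comp[i] and price[j] < m:
--                 m = price[j]
--         total += m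
--     return total
-- ===== Notes on version B (the rewrite author's own statement) =====
-- stated objective: alternative
-- what changed: Union-find with path compression plus a dict that groups nodes by root and accumulates (min,count) per group is replaced by component labelling via whole-array relabelling per transformation, and the total is computed as the sum over nodes of the minimum price in each node's component (no parent pointers, no find recursion, no grouping dict).
import Mathlib
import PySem

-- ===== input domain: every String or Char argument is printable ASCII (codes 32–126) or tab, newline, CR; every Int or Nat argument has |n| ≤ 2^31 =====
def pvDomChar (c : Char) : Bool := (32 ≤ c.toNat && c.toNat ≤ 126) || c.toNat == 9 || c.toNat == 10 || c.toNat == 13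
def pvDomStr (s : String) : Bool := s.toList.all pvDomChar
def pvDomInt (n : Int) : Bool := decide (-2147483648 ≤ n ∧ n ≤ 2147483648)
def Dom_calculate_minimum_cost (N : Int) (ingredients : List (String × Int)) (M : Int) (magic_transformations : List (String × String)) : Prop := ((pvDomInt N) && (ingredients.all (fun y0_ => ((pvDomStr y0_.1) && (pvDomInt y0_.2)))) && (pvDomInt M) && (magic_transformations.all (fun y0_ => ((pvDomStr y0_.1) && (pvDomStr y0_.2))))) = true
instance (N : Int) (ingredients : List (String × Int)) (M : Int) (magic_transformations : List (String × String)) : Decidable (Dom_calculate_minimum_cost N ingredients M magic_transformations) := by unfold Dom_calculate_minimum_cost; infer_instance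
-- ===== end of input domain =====

-- B replaces union-find + per-root (min,count) dict grouping by whole-array component relabelling
-- and a per-node minimum-over-component sum; same return value on every input where A returns.


-- ===== PORT A =====
-- dic = {ingredient[0]: idx for idx, ingredient in enumerate(ingredients)}
def pvDicA (ingredients : List (String × Int)) : PySem.Dict String Int :=
  (PySem.List.enumerate ingredients 0).foldl (fun d p => d.insert p.2.1 p.1) PySem.Dict.empty

-- def find(x): path-compressing find; fuel = parent-list length + 1 (always enough: the
-- parent structure is a forest, so the chain from x visits distinct nodes). none = IndexError.
def pvFindA (fuel : Nat) (parent : List Int) (x : Int) : Option (List Int × Int) :=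
  match fuel with
  | 0 => none
  | f+1 =>
    match PySem.List.pyGet? parent x with
    | none => none
    | some px =>
      if px = x then some (parent, x)
      else
        match pvFindA f parent px with
        | none => none
        | some (p1, r) =>
          match PySem.List.pySet? p1 x r with   -- parent[x] = find(parent[x])
          | none => none
          | some p2 => some (p2, r)             -- return parent[x]

-- for s, t in magic_transformations: union of the roots
def pvEdgesA (dic : PySem.Dict String Int) (mt : List (String × String)) (parent : List Int) : Option (List Int) :=
  match mt with
  | [] => some parent
  | (s, t) :: rest =>
    match dic.get? s, dic.get? t with
    | some si, some ti =>
      match pvFindA (parent.length + 1) parent si with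
      | none => none
      | some (p1, ps) =>
        match pvFindA (p1.length + 1) p1 ti with
        | none => none
        | some (p2, pt) =>
          match PySem.List.pySet? p2 ps pt with  -- parent[ps] = pt
          | none => none
          | some p3 => pvEdgesA dic rest p3
    | _, _ => none                               -- KeyError

-- for i in range(N): group by root, keeping (min_price, cnt)
def pvGroupA (price : List Int) (idxs : List Int) (parent : List Int)
    (groups : PySem.Dict Int (Int × Int)) : Option (PySem.Dict Int (Int × Int)) :=
  match idxs with
  | [] => some groups
  | i :: rest =>
    match pvFindA (parent.length + 1) parent i with
    | none => none
    | some (p1, root) =>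
      match PySem.List.pyGet? price i with
      | none => none
      | some pi =>
        match groups.get? root with
        | some (m, c) => pvGroupA price rest p1 (groups.insert root ((if pi < m then pi else m), c + 1))
        | none => pvGroupA price rest p1 (groups.insert root (pi, 1))

def calculate_minimum_cost (N : Int) (ingredients : List (String × Int)) (M : Int) (magic_transformations : List (String × String)) : Int :=
  let dic := pvDicA ingredients
  let price := ingredients.map (fun ing => ing.2)
  let parent0 := PySem.List.pyRange 0 N 1
  match pvEdgesA dic magic_transformations parent0 with
  | none => 0
  | some p =>
    match pvGroupA price (PySem.List.pyRange 0 N 1) p PySem.Dict.empty with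
    | none => 0
    | some groups => (groups.items.map (fun q => q.2.1 * q.2.2)).sum

-- ===== PORT B =====
def pvDicB (ingredients : List (String × Int)) : PySem.Dict String Int :=
  (PySem.List.enumerate ingredients 0).foldl (fun d p => d.insert p.2.1 p.1) PySem.Dict.empty

-- for s, t in magic_transformations: comp = [ct if c == cs else c for c in comp]
def pvRelabelB (dic : PySem.Dict String Int) (mt : List (String × String)) (comp : List Int) : Option (List Int) :=
  match mt with
  | [] => some comp
  | (s, t) :: rest =>
    match dic.get? s, dic.get? t with
    | some si, some ti =>
      match PySem.List.pyGet? comp si, PySem.List.pyGet? comp ti with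
      | some cs, some ct => pvRelabelB dic rest (comp.map (fun c => if c = cs then ct else c))
      | _, _ => none
    | _, _ => none

-- inner loop: for j in range(N): if comp[j] == comp[i] and price[j] < m: m = price[j]
def pvMinB (comp price : List Int) (i : Int) (js : List Int) (m : Int) : Option Int :=
  match js with
  | [] => some m
  | j :: rest =>
    match PySem.List.pyGet? comp j, PySem.List.pyGet? comp i with
    | some cj, some ci =>
      if cj = ci then
        match PySem.List.pyGet? price j with
        | some pj => pvMinB comp price i rest (if pj < m then pj else m)
        | none => none
      else pvMinB comp price i rest m
    | _, _ => none

-- outer loop: for i in range(N): total += m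
def pvTotalB (comp price : List Int) (N : Int) (is' : List Int) (total : Int) : Option Int :=
  match is' with
  | [] => some total
  | i :: rest =>
    match PySem.List.pyGet? price i with
    | none => none
    | some pi =>
      match pvMinB comp price i (PySem.List.pyRange 0 N 1) pi with
      | none => none
      | some m => pvTotalB comp price N rest (total + m)

def calculate_minimum_cost_alt (N : Int) (ingredients : List (String × Int)) (M : Int) (magic_transformations : List (String × String)) : Int :=
  let dic := pvDicB ingredients
  let price := ingredients.map (fun ing => ing.2)
  let comp0 := PySem.List.pyRange 0 N 1
  match pvRelabelB dic magic_transformations comp0 with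
  | none => 0
  | some comp =>
    match pvTotalB comp price N (PySem.List.pyRange 0 N 1) 0 with
    | none => 0
    | some t => t

-- ===== PRECONDITION & SPEC =====
-- index of the LAST occurrence of name s among the ingredient names (= what the dict comprehension stores)
def pvNameIdx (ingredients : List (String × Int)) (s : String) : Option Int :=
  (PySem.List.enumerate ingredients 0).foldl (fun acc p => if p.2.1 = s then some p.1 else acc) none

def pvIdxOK (ingredients : List (String × Int)) (s : String) (N : Int) : Bool :=
  match pvNameIdx ingredients s with
  | some i => decide (i < N)
  | none => false

-- Pre_ is exactly where the Python A returns: N ≤ len(ingredients) (else price[i] raises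
-- IndexError), andevery transformation names are known ingredient names whose (last-occurrence)
-- index is < N (else dic[s] raises KeyError resp. parent[...] raises IndexError).
def Pre_calculate_minimum_cost (N : Int) (ingredients : List (String × Int)) (M : Int) (magic_transformations : List (String × String)) : Prop :=
  N ≤ ingredients.length ∧
  ∀ p ∈ magic_transformations, pvIdxOK ingredients p.1 N = true ∧ pvIdxOK ingredients p.2 N = true
instance (N : Int) (ingredients : List (String × Int)) (M : Int) (magic_transformations : List (String × String)) : Decidable (Pre_calculate_minimum_cost N ingredients M magic_transformations) := by unfold Pre_calculate_minimum_cost; infer_instance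

def pvWitness_calculate_minimum_cost : Int × (List (String × Int)) × Int × (List (String × String)) :=
  (2, [("a", 3), ("b", 1)], 1, [("a", "b")])

def Spec_calculate_minimum_cost (N : Int) (ingredients : List (String × Int)) (M : Int) (magic_transformations : List (String × String)) (out : Int) : Prop := out = calculate_minimum_cost_alt N ingredients M magic_transformations
instance (N : Int) (ingredients : List (String × Int)) (M : Int) (magic_transformations : List (String × String)) (out : Int) : Decidable (Spec_calculate_minimum_cost N ingredients M magic_transformations out) := by unfold Spec_calculate_minimum_cost; infer_instance

-- ===== CLAIM (what is proved, stated in full; the proofs are below) =====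
def Claim_equal_calculate_minimum_cost : Prop := ∀ (N : Int) (ingredients : List (String × Int)) (M : Int) (magic_transformations : List (String × String)), Dom_calculate_minimum_cost N ingredients M magic_transformations → Pre_calculate_minimum_cost N ingredients M magic_transformations → Spec_calculate_minimum_cost N ingredients M magic_transformations (calculate_minimum_cost N ingredients M magic_transformations)

-- ===== LEMMAS AND PROOFS =====

-- ---- Foundation: parent chains of the union-find forest ----

-- parent/label read at a nonnegative index (only used with 0 ≤ x < length)
def pvG (p : List Int) (x : Int) : Int := p.getD x.toNat 0

-- "the chain from x reaches root r in k steps"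
inductive pvRtD (p : List Int) : Int → Int → Nat → Prop
  | root (x : Int) : pvG p x = x → pvRtD p x x 0
  | step (x r : Int) (k : Nat) : pvG p x ≠ x → pvRtD p (pvG p x) r k → pvRtD p x r (k+1)

def pvValid (N : Int) (p : List Int) : Prop :=
  p.length = N.toNat ∧ ∀ x ∈ p, 0 ≤ x ∧ x < N

def pvForest (N : Int) (p : List Int) : Prop :=
  pvValid N p ∧ ∀ x : Int, 0 ≤ x → x < N → ∃ r k, pvRtD p x r k

theorem pvRtD_det {p : List Int} {x r r' : Int} {k k' : Nat}
    (h : pvRtD p x r k) (h' : pvRtD p x r' k') : r = r' ∧ k = k' := by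
  induction h generalizing r' k' with
  | root x hx =>
    cases h' with
    | root _ _ => exact ⟨rfl, rfl⟩
    | step _ _ _ hne _ => exact absurd hx hne
  | step x r k hne hsub ih =>
    cases h' with
    | root _ hx => exact absurd hx hne
    | step _ _ k2 _ hsub2 =>
      obtain ⟨h1, h2⟩ := ih hsub2
      exact ⟨h1, by omega⟩

theorem pvRtD_isRoot {p : List Int} {x r : Int} {k : Nat} (h : pvRtD p x r k) : pvG p r = r := by
  induction h with
  | root x hx => exact hx
  | step x r k hne hsub ih => exact ih

theorem pvG_mem {N : Int} {p : List Int} (hv : pvValid N p) {x : Int} (hx0 : 0 ≤ x) (hxN : x < N) :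
    pvG p x ∈ p := by
  have hlen : x.toNat < p.length := by
    rcases hv with ⟨hl, _⟩; omega
  have : p.getD x.toNat 0 = p[x.toNat] := List.getD_eq_getElem p 0 hlen
  rw [pvG, this]
  exact List.getElem_mem hlen

theorem pvG_range {N : Int} {p : List Int} (hv : pvValid N p) {x : Int} (hx0 : 0 ≤ x) (hxN : x < N) :
    0 ≤ pvG p x ∧ pvG p x < N :=
  hv.2 _ (pvG_mem hv hx0 hxN)

theorem pvRtD_range {N : Int} {p : List Int} (hv : pvValid N p) {x r : Int} {k : Nat}
    (h : pvRtD p x r k) (hx0 : 0 ≤ x) (hxN : x < N) : 0 ≤ r ∧ r < N := by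
  induction h with
  | root x hx => exact ⟨hx0, hxN⟩
  | step x r k hne hsub ih =>
    have := pvG_range hv hx0 hxN
    exact ih this.1 this.2

-- iterate of the parent map
def pvIter (p : List Int) : Nat → Int → Int
  | 0, x => x
  | i+1, x => pvIter p i (pvG p x)

theorem pvRtD_iter {p : List Int} {x r : Int} {k : Nat} (h : pvRtD p x r k) :
    ∀ i, i ≤ k → pvRtD p (pvIter p i x) r (k - i) := by
  induction h with
  | root x hx =>
    intro i hi
    interval_cases i
    exact pvRtD.root x hx
  | step x r k hne hsub ih =>
    intro i hi
    cases i with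
    | zero => exact pvRtD.step x r k hne hsub
    | succ j =>
      have := ih j (by omega)
      simpa [pvIter, Nat.succ_sub_succ] using this

theorem pvIter_succ (p : List Int) : ∀ (j : Nat) (x : Int), pvIter p (j+1) x = pvG p (pvIter p j x) := by
  intro j
  induction j with
  | zero => intro x; rfl
  | succ m ihm => intro x; simp only [pvIter]; exact ihm _

theorem pvRtD_bound {N : Int} {p : List Int} (hv : pvValid N p) {x r : Int} {k : Nat}
    (h : pvRtD p x r k) (hx0 : 0 ≤ x) (hxN : x < N) : k < N.toNat := by
  -- the chain x, p[x], … visits pairwise distinct nodes of [0, N)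
  have hiter := fun j => pvIter_succ p j x
  have hrange : ∀ i, i ≤ k → 0 ≤ pvIter p i x ∧ pvIter p i x < N := by
    intro i hi
    induction i with
    | zero => exact ⟨hx0, hxN⟩
    | succ j ihj =>
      have hj := ihj (by omega)
      rw [hiter j]
      exact pvG_range hv hj.1 hj.2
  have hf : ∀ i : Fin (k+1), (pvIter p i.1 x).toNat < N.toNat := by
    intro i
    have := hrange i.1 (Nat.lt_succ_iff.mp i.isLt)
    omega
  have hinj : Function.Injective (fun i : Fin (k+1) => (⟨(pvIter p i.1 x).toNat, hf i⟩ : Fin N.toNat)) := by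
    intro a b hab
    simp only [Fin.mk.injEq] at hab
    have ha := hrange a.1 (Nat.lt_succ_iff.mp a.isLt)
    have hb := hrange b.1 (Nat.lt_succ_iff.mp b.isLt)
    have heq : pvIter p a.1 x = pvIter p b.1 x := by omega
    have h1 := pvRtD_iter h a.1 (Nat.lt_succ_iff.mp a.isLt)
    have h2 := pvRtD_iter h b.1 (Nat.lt_succ_iff.mp b.isLt)
    rw [heq] at h1
    have hk := (pvRtD_det h1 h2).2
    exact Fin.ext (by omega)
  have := Fintype.card_le_of_injective _ hinj
  simpa using this

-- non-compressing root computation (used only to STATE what find returns)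
def pvRoot (fuel : Nat) (p : List Int) (x : Int) : Int :=
  match fuel with
  | 0 => x
  | f+1 => if pvG p x = x then x else pvRoot f p (pvG p x)

theorem pvRoot_eq {p : List Int} {x r : Int} {k : Nat} (h : pvRtD p x r k) :
    ∀ fuel, k < fuel → pvRoot fuel p x = r := by
  induction h with
  | root x hx =>
    intro fuel hf
    cases fuel with
    | zero => omega
    | succ f => simp [pvRoot, hx]
  | step x r k hne hsub ih =>
    intro fuel hf
    cases fuel with
    | zero => omega
    | succ f => simp only [pvRoot, if_neg hne]; exact ih f (by omega)
-- ---- reading / writing the parent list at a nonnegative in-range Int index ----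

theorem pvGetD_set (l : List Int) (i n : Nat) (v d : Int) (h : i < l.length) :
    (l.set i v).getD n d = if n = i then v else l.getD n d := by
  simp only [List.getD_eq_getElem?_getD, List.getElem?_set]
  split_ifs with h1 h2 h3
  · simp
  · omega
  · omega
  · rfl

theorem pvPyGet {p : List Int} {x : Int} (h0 : 0 ≤ x) (h : x.toNat < p.length) :
    PySem.List.pyGet? p x = some (pvG p x) := by
  obtain ⟨n, rfl⟩ : ∃ n : Nat, x = (n : Int) := ⟨x.toNat, by omega⟩
  simp only [Int.toNat_natCast] at h ⊢
  rw [PySem.List.pyGet?_natCast p n]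
  simp [List.getElem?_eq_getElem h, pvG]

theorem pvPySet {p : List Int} {x : Int} (v : Int) (h0 : 0 ≤ x) (h : x.toNat < p.length) :
    PySem.List.pySet? p x v = some (p.set x.toNat v) := by
  obtain ⟨n, rfl⟩ : ∃ n : Nat, x = (n : Int) := ⟨x.toNat, by omega⟩
  simp only [Int.toNat_natCast] at h ⊢
  rw [PySem.List.pySet?_natCast p n v h]

theorem pvG_set {p : List Int} {x z v : Int} (hx0 : 0 ≤ x) (hz0 : 0 ≤ z) (hx : x.toNat < p.length) :
    pvG (p.set x.toNat v) z = if z = x then v else pvG p z := by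
  rw [pvG, pvGetD_set p x.toNat z.toNat v 0 hx]
  by_cases h : z = x
  · simp [h]
  · rw [if_neg (by omega), if_neg h]; rfl

theorem pvValid_set {N : Int} {p : List Int} (hv : pvValid N p) {v : Int} (hv0 : 0 ≤ v) (hvN : v < N) (i : Nat) :
    pvValid N (p.set i v) := by
  refine ⟨by simpa using hv.1, ?_⟩
  intro y hy
  rcases List.mem_or_eq_of_mem_set hy with h | h
  · exact hv.2 y h
  · subst h; exact ⟨hv0, hvN⟩

-- writing a node's root into its parent slot preserves every root (depths do not grow)
theorem pvSet_preserve {N : Int} {p : List Int} (hv : pvValid N p) {x r : Int} {kx : Nat}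
    (hx0 : 0 ≤ x) (hxN : x < N) (hroot : pvRtD p x r kx) :
    ∀ k z rz, pvRtD p z rz k → 0 ≤ z → z < N →
      ∃ k' ≤ k, pvRtD (p.set x.toNat r) z rz k' := by
  have hxlen : x.toNat < p.length := by rcases hv with ⟨hl, _⟩; omega
  have hGset : ∀ z : Int, 0 ≤ z → pvG (p.set x.toNat r) z = if z = x then r else pvG p z :=
    fun z hz => pvG_set hx0 hz hxlen
  intro k
  induction k using Nat.strong_induction_on with
  | _ k ih =>
    intro z rz hder h0 hN
    cases hder with
    | root _ hz =>
      by_cases hzx : z = x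
      · subst hzx
        obtain ⟨hr, _⟩ := pvRtD_det hroot (pvRtD.root z hz)
        refine ⟨0, le_refl 0, pvRtD.root z ?_⟩
        rw [hGset z h0, if_pos rfl, hr]
      · exact ⟨0, le_refl 0, pvRtD.root z (by rw [hGset z h0, if_neg hzx, hz])⟩
    | step _ _ k0 hne hsub =>
      by_cases hzx : z = x
      · subst hzx
        obtain ⟨hr, -⟩ := pvRtD_det hroot (pvRtD.step z rz k0 hne hsub)
        subst hr
        have hrootIs : pvG p r = r := pvRtD_isRoot hroot
        have hrx : r ≠ z := by
          intro hcon; rw [hcon] at hrootIs; exact hne hrootIs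
        have hr0 : 0 ≤ r := (pvRtD_range hv hroot hx0 hxN).1
        refine ⟨1, by omega, pvRtD.step z r 0 ?_ ?_⟩
        · rw [hGset z h0, if_pos rfl]; exact hrx
        · rw [hGset z h0, if_pos rfl]
          exact pvRtD.root r (by rw [hGset r hr0, if_neg hrx, hrootIs])
      · have hw := pvG_range hv h0 hN
        obtain ⟨k', hk', hder'⟩ := ih k0 (by omega) _ rz hsub hw.1 hw.2
        refine ⟨k' + 1, by omega, pvRtD.step z rz k' ?_ ?_⟩
        · rw [hGset z h0, if_neg hzx]; exact hne
        · rw [hGset z h0, if_neg hzx]; exact hder'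
-- ---- find: returns the root, succeeds with fuel = length + 1, preserves all roots ----

theorem pvFindA_ok {N : Int} :
    ∀ k, ∀ (fuel : Nat) (p : List Int), pvForest N p → ∀ x r, pvRtD p x r k → k < fuel → 0 ≤ x → x < N →
      ∃ p', pvFindA fuel p x = some (p', r) ∧ pvForest N p' ∧ p'.length = p.length ∧
        (∀ z rz kz, 0 ≤ z → z < N → pvRtD p z rz kz → ∃ kz' ≤ kz, pvRtD p' z rz kz') := by
  intro k
  induction k using Nat.strong_induction_on with
  | _ k ih =>
    intro fuel p hf x r hder hk hx0 hxN
    have hxlen : x.toNat < p.length := by rcases hf.1 with ⟨hl, _⟩; omega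
    obtain ⟨f, rfl⟩ : ∃ f, fuel = f + 1 := ⟨fuel - 1, by omega⟩
    rw [pvFindA, pvPyGet hx0 hxlen]
    by_cases hroot : pvG p x = x
    · obtain ⟨hr, hk0⟩ := pvRtD_det hder (pvRtD.root x hroot)
      subst hr
      simp only [if_pos hroot]
      exact ⟨p, rfl, hf, rfl, fun z rz kz _ _ h => ⟨kz, le_refl _, h⟩⟩
    · simp only [if_neg hroot]
      cases hder with
      | root _ hz => exact absurd hz hroot
      | step _ _ k0 hne hsub =>
        have hw := pvG_range hf.1 hx0 hxN
        obtain ⟨p1, hp1, hf1, hlen1, hpres1⟩ := ih k0 (by omega) f p hf _ r hsub (by omega) hw.1 hw.2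
        rw [hp1]
        dsimp only
        obtain ⟨k1, hk1, hder1⟩ := hpres1 x r (k0 + 1) hx0 hxN (pvRtD.step x r k0 hne hsub)
        have hxlen1 : x.toNat < p1.length := by omega
        rw [pvPySet r hx0 hxlen1]
        dsimp only
        have hr0 := pvRtD_range hf.1 (pvRtD.step x r k0 hne hsub) hx0 hxN
        have hpres2 := pvSet_preserve hf1.1 hx0 hxN hder1
        have hvalid2 : pvValid N (p1.set x.toNat r) := pvValid_set hf1.1 hr0.1 hr0.2 x.toNat
        refine ⟨p1.set x.toNat r, rfl, ⟨hvalid2, ?_⟩, by simpa using hlen1, ?_⟩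
        · intro y hy0 hyN
          obtain ⟨ry, ky, hder_y⟩ := hf1.2 y hy0 hyN
          obtain ⟨ky', _, hder_y'⟩ := hpres2 ky y ry hder_y hy0 hyN
          exact ⟨ry, ky', hder_y'⟩
        · intro z rz kz hz0 hzN hzder
          obtain ⟨kz1, hkz1, hzder1⟩ := hpres1 z rz kz hz0 hzN hzder
          obtain ⟨kz2, hkz2, hzder2⟩ := hpres2 kz1 z rz hzder1 hz0 hzN
          exact ⟨kz2, by omega, hzder2⟩

-- ---- union: parent[ps] = pt maps every root ps to pt and keeps all other roots ----

theorem pvUnion {N : Int} {p : List Int} (hf : pvForest N p) {ps pt : Int}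
    (hps0 : 0 ≤ ps) (hpsN : ps < N) (hpt0 : 0 ≤ pt) (hptN : pt < N)
    (hrs : pvG p ps = ps) (hrt : pvG p pt = pt) :
    pvValid N (p.set ps.toNat pt) ∧
    ∀ k z rz, pvRtD p z rz k → 0 ≤ z → z < N →
      ∃ k', pvRtD (p.set ps.toNat pt) z (if rz = ps then pt else rz) k' := by
  have hpslen : ps.toNat < p.length := by rcases hf.1 with ⟨hl, _⟩; omega
  have hGset : ∀ z : Int, 0 ≤ z → pvG (p.set ps.toNat pt) z = if z = ps then pt else pvG p z :=
    fun z hz => pvG_set hps0 hz hpslen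
  refine ⟨pvValid_set hf.1 hpt0 hptN ps.toNat, ?_⟩
  intro k
  induction k using Nat.strong_induction_on with
  | _ k ih =>
    intro z rz hder h0 hN
    cases hder with
    | root _ hz =>
      by_cases hzs : z = ps
      · subst hzs
        rw [if_pos rfl]
        by_cases hst : pt = z
        · exact ⟨0, by rw [hst]; exact pvRtD.root z (by rw [pvG_set hps0 h0 hpslen]; simp)⟩
        · refine ⟨1, pvRtD.step z pt 0 ?_ ?_⟩
          · rw [hGset z h0, if_pos rfl]; exact hst
          · rw [hGset z h0, if_pos rfl]
            exact pvRtD.root pt (by rw [hGset pt hpt0, if_neg (by intro hc; rw [hc] at hst; exact hst rfl), hrt])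
      · rw [if_neg hzs]
        exact ⟨0, pvRtD.root z (by rw [hGset z h0, if_neg hzs, hz])⟩
    | step _ _ k0 hne hsub =>
      have hzs : z ≠ ps := by
        intro hc; rw [hc] at hne; exact hne hrs
      have hw := pvG_range hf.1 h0 hN
      obtain ⟨k', hder'⟩ := ih k0 (by omega) _ rz hsub hw.1 hw.2
      refine ⟨k' + 1, pvRtD.step z _ k' ?_ ?_⟩
      · rw [hGset z h0, if_neg hzs]; exact hne
      · rw [hGset z h0, if_neg hzs]; exact hder'
-- ---- the name→index dict: lookup = last matching index ----

theorem pvDic_fold_get (s : String) :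
    ∀ (l : List (Int × (String × Int))) (d : PySem.Dict String Int),
      ((l.foldl (fun d p => d.insert p.2.1 p.1) d).get? s) =
        l.foldl (fun acc p => if p.2.1 = s then some p.1 else acc) (d.get? s) := by
  intro l
  induction l with
  | nil => intro d; rfl
  | cons p rest ih =>
    intro d
    simp only [List.foldl_cons, ih]
    congr 1
    rw [PySem.Dict.get?_insert]
    by_cases h : p.2.1 = s
    · rw [if_pos h, if_pos h.symm]
    · rw [if_neg h, if_neg (fun hc => h hc.symm)]

theorem pvDic_get (ingredients : List (String × Int)) (s : String) :
    (pvDicA ingredients).get? s = pvNameIdx ingredients s := by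
  rw [pvDicA, pvNameIdx, pvDic_fold_get s]
  rfl

theorem pvDicB_eq (ingredients : List (String × Int)) : pvDicB ingredients = pvDicA ingredients := rfl

theorem pvNameIdx_nonneg {ingredients : List (String × Int)} {s : String} {i : Int}
    (h : pvNameIdx ingredients s = some i) : 0 ≤ i := by
  rw [pvNameIdx] at h
  have main : ∀ (l : List (Int × (String × Int))) (acc : Option Int),
      (∀ j, acc = some j → 0 ≤ j) → (∀ p ∈ l, 0 ≤ p.1) →
      ∀ j, l.foldl (fun acc p => if p.2.1 = s then some p.1 else acc) acc = some j → 0 ≤ j := by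
    intro l
    induction l with
    | nil => intro acc hacc _ j hj; exact hacc j hj
    | cons p rest ih =>
      intro acc hacc hl j hj
      simp only [List.foldl_cons] at hj
      refine ih _ ?_ (fun q hq => hl q (List.mem_cons_of_mem p hq)) j hj
      intro j' hj'
      split_ifs at hj'
      · have hp1 : p.1 = j' := by injection hj'
        have := hl p List.mem_cons_self
        omega
      · exact hacc j' hj'
  refine main _ none (by intro j h; cases h) ?_ i h
  intro p hp
  rw [PySem.List.mem_enumerate_iff] at hp
  obtain ⟨k, hk, rfl⟩ := hp
  simp

-- ---- coupling: equal parent-roots ↔ equal component labels ----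

def pvInv (N : Int) (p comp : List Int) : Prop :=
  pvForest N p ∧ comp.length = N.toNat ∧
  ∀ i j ri rj : Int, ∀ ki kj : Nat, 0 ≤ i → i < N → 0 ≤ j → j < N →
    pvRtD p i ri ki → pvRtD p j rj kj → (ri = rj ↔ pvG comp i = pvG comp j)

theorem pvG_map {comp : List Int} {G : Int → Int} {i : Int} (h0 : 0 ≤ i)
    (h : i.toNat < comp.length) : pvG (comp.map G) i = G (pvG comp i) := by
  rw [pvG, pvG, List.getD_eq_getElem _ 0 (by simpa using h), List.getD_eq_getElem _ 0 h]
  simp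

theorem pvFG_iff {ps pt cs ct ri rj ci cj : Int}
    (h1 : ri = ps ↔ ci = cs) (h2 : rj = ps ↔ cj = cs)
    (h3 : ri = pt ↔ ci = ct) (h4 : rj = pt ↔ cj = ct) (h5 : ri = rj ↔ ci = cj) :
    ((if ri = ps then pt else ri) = (if rj = ps then pt else rj)) ↔
      ((if ci = cs then ct else ci) = (if cj = cs then ct else cj)) := by
  by_cases a : ri = ps
  · rw [if_pos a, if_pos (h1.mp a)]
    by_cases b : rj = ps
    · rw [if_pos b, if_pos (h2.mp b)]
      simp
    · rw [if_neg b, if_neg (fun hc => b (h2.mpr hc))]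
      constructor
      · intro h; exact (h4.mp h.symm).symm
      · intro h; exact (h4.mpr h.symm).symm
  · rw [if_neg a, if_neg (fun hc => a (h1.mpr hc))]
    by_cases b : rj = ps
    · rw [if_pos b, if_pos (h2.mp b)]
      exact ⟨fun h => h3.mp h, fun h => h3.mpr h⟩
    · rw [if_neg b, if_neg (fun hc => b (h2.mpr hc))]
      exact h5

theorem pvEdges_sim {N : Int} (dic : PySem.Dict String Int)
    (hdic : ∀ s i, dic.get? s = some i → 0 ≤ i) :
    ∀ (mt : List (String × String)) (p comp : List Int), pvInv N p comp →
      (∀ q ∈ mt, (∃ i, dic.get? q.1 = some i ∧ i < N) ∧ (∃ j, dic.get? q.2 = some j ∧ j < N)) →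
      ∃ p' comp', pvEdgesA dic mt p = some p' ∧ pvRelabelB dic mt comp = some comp' ∧ pvInv N p' comp' := by
  intro mt
  induction mt with
  | nil => intro p comp hinv _; exact ⟨p, comp, rfl, rfl, hinv⟩
  | cons q rest ih =>
    intro p comp hinv hq
    obtain ⟨⟨si, hsi, hsiN⟩, ⟨ti, hti, htiN⟩⟩ := hq q List.mem_cons_self
    have hsi0 := hdic _ _ hsi
    have hti0 := hdic _ _ hti
    obtain ⟨hforest, hclen, hiff⟩ := hinv
    have hplen : p.length = N.toNat := hforest.1.1
    -- find(si)
    obtain ⟨rsi, ksi, hdsi⟩ := hforest.2 si hsi0 hsiN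
    have hbsi := pvRtD_bound hforest.1 hdsi hsi0 hsiN
    obtain ⟨p1, hfind1, hf1, hlen1, hpres1⟩ :=
      pvFindA_ok ksi (p.length + 1) p hforest si rsi hdsi (by omega) hsi0 hsiN
    -- find(ti)
    obtain ⟨rti, kti, hdti⟩ := hforest.2 ti hti0 htiN
    obtain ⟨kti1, _, hdti1⟩ := hpres1 ti rti kti hti0 htiN hdti
    have hbti := pvRtD_bound hf1.1 hdti1 hti0 htiN
    obtain ⟨p2, hfind2, hf2, hlen2, hpres2⟩ :=
      pvFindA_ok kti1 (p1.length + 1) p1 hf1 ti rti hdti1 (by rw [hlen1, hplen]; omega) hti0 htiN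
    -- roots and ranges
    have hrsi_range := pvRtD_range hforest.1 hdsi hsi0 hsiN
    have hrti_range := pvRtD_range hforest.1 hdti hti0 htiN
    have hroot_si : pvG p2 rsi = rsi := by
      have h0 : pvRtD p rsi rsi 0 := pvRtD.root rsi (pvRtD_isRoot hdsi)
      obtain ⟨k1, hk1, hd1⟩ := hpres1 rsi rsi 0 hrsi_range.1 hrsi_range.2 h0
      obtain ⟨k2, hk2, hd2⟩ := hpres2 rsi rsi k1 hrsi_range.1 hrsi_range.2 hd1
      have hk20 : k2 = 0 := by omega
      subst hk20
      cases hd2 with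
      | root _ h => exact h
    have hroot_ti : pvG p2 rti = rti := by
      have h0 : pvRtD p rti rti 0 := pvRtD.root rti (pvRtD_isRoot hdti)
      obtain ⟨k1, hk1, hd1⟩ := hpres1 rti rti 0 hrti_range.1 hrti_range.2 h0
      obtain ⟨k2, hk2, hd2⟩ := hpres2 rti rti k1 hrti_range.1 hrti_range.2 hd1
      have hk20 : k2 = 0 := by omega
      subst hk20
      cases hd2 with
      | root _ h => exact h
    -- union
    have hlen2' : rsi.toNat < p2.length := by rw [hlen2, hlen1, hplen]; omega
    obtain ⟨hvalid3, hmap3⟩ := pvUnion hf2 hrsi_range.1 hrsi_range.2 hrti_range.1 hrti_range.2 hroot_si hroot_ti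
    set p3 := p2.set rsi.toNat rti with hp3
    -- comp side
    have hsilen : si.toNat < comp.length := by omega
    have htilen : ti.toNat < comp.length := by omega
    set cs := pvG comp si with hcs
    set ct := pvG comp ti with hct
    set G := fun c : Int => if c = cs then ct else c with hG
    -- combined root transform
    have hmapAll : ∀ z rz : Int, ∀ k : Nat, 0 ≤ z → z < N → pvRtD p z rz k →
        ∃ k', pvRtD p3 z (if rz = rsi then rti else rz) k' := by
      intro z rz k hz0 hzN hd
      obtain ⟨k1, _, hd1⟩ := hpres1 z rz k hz0 hzN hd
      obtain ⟨k2, _, hd2⟩ := hpres2 z rz k1 hz0 hzN hd1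
      exact hmap3 k2 z rz hd2 hz0 hzN
    -- new invariant
    have hinv3 : pvInv N p3 (comp.map G) := by
      refine ⟨⟨hvalid3, ?_⟩, by simpa using hclen, ?_⟩
      · intro x hx0 hxN
        obtain ⟨rx, kx, hdx⟩ := hforest.2 x hx0 hxN
        obtain ⟨k', hd'⟩ := hmapAll x rx kx hx0 hxN hdx
        exact ⟨_, k', hd'⟩
      · intro i j Ri Rj Ki Kj hi0 hiN hj0 hjN hdi3 hdj3
        obtain ⟨ri, ki, hdi⟩ := hforest.2 i hi0 hiN
        obtain ⟨rj, kj, hdj⟩ := hforest.2 j hj0 hjN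
        obtain ⟨ki', hdi'⟩ := hmapAll i ri ki hi0 hiN hdi
        obtain ⟨kj', hdj'⟩ := hmapAll j rj kj hj0 hjN hdj
        obtain ⟨hRi, -⟩ := pvRtD_det hdi3 hdi'
        obtain ⟨hRj, -⟩ := pvRtD_det hdj3 hdj'
        subst hRi; subst hRj
        have hilen : i.toNat < comp.length := by omega
        have hjlen : j.toNat < comp.length := by omega
        rw [pvG_map hi0 hilen, pvG_map hj0 hjlen]
        exact pvFG_iff
          (hiff i si ri rsi ki ksi hi0 hiN hsi0 hsiN hdi hdsi)
          (hiff j si rj rsi kj ksi hj0 hjN hsi0 hsiN hdj hdsi)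
          (hiff i ti ri rti ki kti hi0 hiN hti0 htiN hdi hdti)
          (hiff j ti rj rti kj kti hj0 hjN hti0 htiN hdj hdti)
          (hiff i j ri rj ki kj hi0 hiN hj0 hjN hdi hdj)
    obtain ⟨p', comp', hA, hB, hinv'⟩ := ih p3 (comp.map G) hinv3
      (fun q' hq' => hq q' (List.mem_cons_of_mem q hq'))
    refine ⟨p', comp', ?_, ?_, hinv'⟩
    · rw [pvEdgesA, hsi, hti]
      dsimp only
      rw [hfind1]
      dsimp only
      rw [hfind2]
      dsimp only
      rw [pvPySet rti hrsi_range.1 hlen2']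
      exact hA
    · rw [pvRelabelB, hsi, hti]
      dsimp only
      rw [pvPyGet hsi0 hsilen, pvPyGet hti0 htilen]
      exact hB
-- ---- A's grouping loop: a pure dict fold over the (fixed) roots ----

def pvUpdVal (pr R : Int → Int) (g : PySem.Dict Int (Int × Int)) (i : Int) : Int × Int :=
  match g.get? (R i) with
  | some mc => ((if pr i < mc.1 then pr i else mc.1), mc.2 + 1)
  | none => (pr i, 1)

theorem pvGroupA_run {N : Int} (price pstar : List Int) (hfstar : pvForest N pstar) :
    ∀ (idxs : List Int) (p : List Int) (g : PySem.Dict Int (Int × Int)), pvForest N p →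
      (∀ z rz : Int, ∀ k : Nat, 0 ≤ z → z < N → pvRtD pstar z rz k → ∃ k', pvRtD p z rz k') →
      (∀ i ∈ idxs, 0 ≤ i ∧ i < N ∧ i.toNat < price.length) →
      pvGroupA price idxs p g =
        some (idxs.foldl (fun g i => g.insert (pvRoot N.toNat pstar i)
          (pvUpdVal (fun j => pvG price j) (pvRoot N.toNat pstar) g i)) g) := by
  intro idxs
  induction idxs with
  | nil => intro p g _ _ _; rfl
  | cons i rest ih =>
    intro p g hf hpres hall
    obtain ⟨hi0, hiN, hiprice⟩ := hall i List.mem_cons_self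
    obtain ⟨ri, ki, hdstar⟩ := hfstar.2 i hi0 hiN
    have hRi : pvRoot N.toNat pstar i = ri :=
      pvRoot_eq hdstar N.toNat (pvRtD_bound hfstar.1 hdstar hi0 hiN)
    obtain ⟨k', hd'⟩ := hpres i ri ki hi0 hiN hdstar
    have hbound : k' < p.length + 1 := by
      have := pvRtD_bound hf.1 hd' hi0 hiN
      have := hf.1.1
      omega
    obtain ⟨p1, hfind, hf1, hlen1, hpres1⟩ := pvFindA_ok k' (p.length + 1) p hf i ri hd' hbound hi0 hiN
    rw [pvGroupA, hfind]
    dsimp only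
    rw [pvPyGet hi0 hiprice]
    dsimp only
    have hpres' : ∀ z rz : Int, ∀ k : Nat, 0 ≤ z → z < N → pvRtD pstar z rz k → ∃ k'', pvRtD p1 z rz k'' := by
      intro z rz k hz0 hzN hd
      obtain ⟨k1, hd1⟩ := hpres z rz k hz0 hzN hd
      obtain ⟨k2, _, hd2⟩ := hpres1 z rz k1 hz0 hzN hd1
      exact ⟨k2, hd2⟩
    have hrest := fun q hq => hall q (List.mem_cons_of_mem i hq)
    rw [List.foldl_cons]
    cases hget : g.get? ri with
    | none =>
      dsimp only
      have hstep : g.insert (pvRoot N.toNat pstar i)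
          (pvUpdVal (fun j => pvG price j) (pvRoot N.toNat pstar) g i) = g.insert ri (pvG price i, 1) := by
        simp only [pvUpdVal, hRi, hget]
      rw [hstep]
      exact ih p1 _ hf1 hpres' hrest
    | some mc =>
      obtain ⟨m, c⟩ := mc
      dsimp only
      have hstep : g.insert (pvRoot N.toNat pstar i)
          (pvUpdVal (fun j => pvG price j) (pvRoot N.toNat pstar) g i)
          = g.insert ri ((if pvG price i < m then pvG price i else m), c + 1) := by
        simp only [pvUpdVal, hRi, hget]
      rw [hstep]
      exact ih p1 _ hf1 hpres' hrest

-- ---- the dict fold, characterized: per root, (min price over the class, class size) ----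

def pvMn (pr R : Int → Int) (L : List Int) (r : Int) : Int :=
  match (L.filter (fun i => R i = r)).map pr with
  | [] => 0
  | a :: rest => rest.foldl (fun m v => if v < m then v else m) a

theorem pvUpdVal_eq (pr R : Int → Int) (g : PySem.Dict Int (Int × Int)) (i : Int) :
    pvUpdVal pr R g i = match g.get? (R i) with
      | some mc => ((if pr i < mc.1 then pr i else mc.1), mc.2 + 1)
      | none => (pr i, 1) := rfl

theorem pvMn_eq (pr R : Int → Int) (L : List Int) (r : Int) :
    pvMn pr R L r = match (L.filter (fun i => R i = r)).map pr with
      | [] => 0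
      | a :: rest => rest.foldl (fun m v => if v < m then v else m) a := rfl

theorem pvSpec_get (pr R : Int → Int) :
    ∀ (L : List Int) (r : Int),
      ((L.foldl (fun g i => g.insert (R i) (pvUpdVal pr R g i)) PySem.Dict.empty).get? r) =
        if (L.filter (fun i => R i = r)) = [] then none
        else some (pvMn pr R L r, ((L.filter (fun i => R i = r)).length : Int)) := by
  intro L
  induction L using List.reverseRecOn with
  | nil => intro r; simp [PySem.Dict.get?_empty]
  | append_singleton L i ih =>
    intro r
    rw [List.foldl_append, List.foldl_cons, List.foldl_nil, PySem.Dict.get?_insert]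
    by_cases hri : R i = r
    · rw [if_pos hri.symm, pvUpdVal_eq, hri, ih r]
      have hflA : (L ++ [i]).filter (fun j => decide (R j = r))
          = L.filter (fun j => decide (R j = r)) ++ [i] := by
        rw [List.filter_append]; simp [hri]
      cases hfl : L.filter (fun j => decide (R j = r)) with
      | nil =>
        rw [hfl] at hflA
        rw [if_pos rfl]
        have hmn : pvMn pr R (L ++ [i]) r = pr i := by
          rw [pvMn_eq, hflA]
          rfl
        rw [hflA, hmn, if_neg (by simp)]
        rfl
      | cons b rest =>
        rw [hfl] at hflA
        rw [if_neg (List.cons_ne_nil b rest)]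
        have hmn : pvMn pr R (L ++ [i]) r
            = if pr i < pvMn pr R L r then pr i else pvMn pr R L r := by
          rw [pvMn_eq, pvMn_eq, hflA, hfl, List.cons_append, List.map_cons, List.map_cons,
            List.map_append]
          dsimp only
          rw [List.foldl_append]
          rfl
        rw [hflA, hmn, if_neg (by simp)]
        dsimp only
        congr 2
        simp
    · rw [if_neg (fun hc => hri hc.symm), ih r]
      have hflA : (L ++ [i]).filter (fun j => decide (R j = r))
          = L.filter (fun j => decide (R j = r)) := by
        rw [List.filter_append]; simp [hri]
      have hmn : pvMn pr R (L ++ [i]) r = pvMn pr R L r := by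
        rw [pvMn_eq, pvMn_eq, hflA]
      rw [hflA, hmn]
-- ---- B's loops, characterized ----

theorem pvMinB_run (comp price : List Int) (i : Int) (hi0 : 0 ≤ i) (hic : i.toNat < comp.length) :
    ∀ (js : List Int) (m : Int),
      (∀ j ∈ js, 0 ≤ j ∧ j.toNat < comp.length ∧ j.toNat < price.length) →
      pvMinB comp price i js m =
        some (js.foldl (fun m j => if pvG comp j = pvG comp i
          then (if pvG price j < m then pvG price j else m) else m) m) := by
  intro js
  induction js with
  | nil => intro m _; rfl
  | cons j rest ih =>
    intro m hall
    obtain ⟨hj0, hjc, hjp⟩ := hall j List.mem_cons_self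
    rw [pvMinB, pvPyGet hj0 hjc, pvPyGet hi0 hic]
    dsimp only
    rw [List.foldl_cons]
    by_cases hc : pvG comp j = pvG comp i
    · rw [if_pos hc, pvPyGet hj0 hjp]
      dsimp only
      rw [if_pos hc]
      exact ih _ (fun q hq => hall q (List.mem_cons_of_mem j hq))
    · rw [if_neg hc, if_neg hc]
      exact ih _ (fun q hq => hall q (List.mem_cons_of_mem j hq))

theorem pvTotalB_run (comp price : List Int) (N : Int)
    (hrange : ∀ j ∈ PySem.List.pyRange 0 N 1, 0 ≤ j ∧ j.toNat < comp.length ∧ j.toNat < price.length) :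
    ∀ (is' : List Int) (total : Int),
      (∀ i ∈ is', 0 ≤ i ∧ i.toNat < comp.length ∧ i.toNat < price.length) →
      pvTotalB comp price N is' total =
        some (total + (is'.map (fun i => (PySem.List.pyRange 0 N 1).foldl
          (fun m j => if pvG comp j = pvG comp i
            then (if pvG price j < m then pvG price j else m) else m) (pvG price i))).sum) := by
  intro is'
  induction is' with
  | nil => intro total _; simp [pvTotalB]
  | cons i rest ih =>
    intro total hall
    obtain ⟨hi0, hic, hip⟩ := hall i List.mem_cons_self
    rw [pvTotalB, pvPyGet hi0 hip]
    dsimp only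
    rw [pvMinB_run comp price i hi0 hic _ _ hrange]
    dsimp only
    rw [ih _ (fun q hq => hall q (List.mem_cons_of_mem i hq))]
    rw [List.map_cons, List.sum_cons]
    congr 1
    ring

-- ---- running minimum: starting from any member gives the min of the class ----

theorem pvIfLt_eq_min : (fun m v : Int => if v < m then v else m) = (fun m v : Int => min m v) := by
  funext m v
  split_ifs with h
  · omega
  · omega

theorem pvFoldlMin_mem {l : List Int} {b : Int} {rest : List Int} (hl : l = b :: rest) {x : Int}
    (hx : x ∈ l) : l.foldl min x = rest.foldl min b := by
  subst hl
  have hLHS := PySem.List.foldl_min_le (b :: rest) x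
  have hRHS := PySem.List.foldl_min_le rest b
  have hLHSmem := PySem.List.foldl_min_mem (b :: rest) x
  have hRHSmem := PySem.List.foldl_min_mem rest b
  have hRHS_all : ∀ y ∈ b :: rest, rest.foldl min b ≤ y := by
    intro y hy
    rcases List.mem_cons.mp hy with h | h
    · subst h; exact hRHS.1
    · exact hRHS.2 y h
  apply le_antisymm
  · rcases hRHSmem with h | h
    · rw [h]
      exact hLHS.2 b (by simp)
    · exact (PySem.List.foldl_min_le (b :: rest) x).2 _ (List.mem_cons_of_mem b h)
  · rcases hLHSmem with h | h
    · rw [h]; exact hRHS_all x hx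
    · exact hRHS_all _ h

-- ---- sum over groups = sum over nodes of their group minimum ----

theorem pvPartitionSum (R mnf : Int → Int) (L K : List Int) (hL : L.Nodup) (hK : K.Nodup)
    (hmem : ∀ r, r ∈ K ↔ ∃ i ∈ L, R i = r) :
    (K.map (fun k => mnf k * ((L.filter (fun i => R i = k)).length : Int))).sum
      = (L.map (fun i => mnf (R i))).sum := by
  rw [← List.sum_toFinset _ hK, ← List.sum_toFinset _ hL]
  have hmaps : ∀ i ∈ L.toFinset, R i ∈ K.toFinset := by
    intro i hi
    rw [List.mem_toFinset] at hi ⊢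
    exact (hmem (R i)).mpr ⟨i, hi, rfl⟩
  rw [← Finset.sum_fiberwise_of_maps_to hmaps (fun i => mnf (R i))]
  apply Finset.sum_congr rfl
  intro k hk
  have hconst : ∑ i ∈ L.toFinset with R i = k, mnf (R i) = ∑ _i ∈ L.toFinset with R _i = k, mnf k := by
    apply Finset.sum_congr rfl
    intro i hi
    rw [(Finset.mem_filter.mp hi).2]
  rw [hconst, Finset.sum_const]
  have hcard : (L.toFinset.filter (fun i => R i = k)).card
      = (L.filter (fun i => R i = k)).length := by
    rw [← List.toFinset_card_of_nodup (hL.filter _), List.toFinset_filter]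
    simp
  rw [hcard, nsmul_eq_mul]
  ring
-- ---- initial state: every node is its own root and its own label ----

theorem pvG_pyRange {N x : Int} (hx0 : 0 ≤ x) (hxN : x < N) :
    pvG (PySem.List.pyRange 0 N 1) x = x := by
  have hlen : (PySem.List.pyRange 0 N 1).length = (N - 0).toNat := PySem.List.length_pyRange_one 0 N
  have hkl : x.toNat < (PySem.List.pyRange 0 N 1).length := by omega
  rw [pvG, List.getD_eq_getElem _ 0 hkl, PySem.List.getElem_pyRange_one]
  omega

theorem pvInit (N : Int) : pvInv N (PySem.List.pyRange 0 N 1) (PySem.List.pyRange 0 N 1) := by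
  have hlen : (PySem.List.pyRange 0 N 1).length = (N - 0).toNat := PySem.List.length_pyRange_one 0 N
  have hvalid : pvValid N (PySem.List.pyRange 0 N 1) := by
    refine ⟨by omega, ?_⟩
    intro x hx
    have := (PySem.List.mem_pyRange_one).mp hx
    omega
  refine ⟨⟨hvalid, ?_⟩, by omega, ?_⟩
  · intro x hx0 hxN
    exact ⟨x, 0, pvRtD.root x (pvG_pyRange hx0 hxN)⟩
  · intro i j ri rj ki kj hi0 hiN hj0 hjN hdi hdj
    obtain ⟨hri, -⟩ := pvRtD_det hdi (pvRtD.root i (pvG_pyRange hi0 hiN))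
    obtain ⟨hrj, -⟩ := pvRtD_det hdj (pvRtD.root j (pvG_pyRange hj0 hjN))
    rw [hri, hrj, pvG_pyRange hi0 hiN, pvG_pyRange hj0 hjN]

-- ---- B's conditional running minimum = min over the R-class prices ----

theorem pvClassMin (R pr' : Int → Int) :
    ∀ (L : List Int) (r m : Int),
      L.foldl (fun m j => if R j = r then (if pr' j < m then pr' j else m) else m) m
        = ((L.filter (fun j => R j = r)).map pr').foldl (fun m v => if v < m then v else m) m := by
  intro L
  induction L with
  | nil => intro r m; rfl
  | cons j rest ih =>
    intro r m
    rw [List.foldl_cons, List.filter_cons]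
    by_cases hc : R j = r
    · rw [if_pos hc]
      simp only [hc, decide_true, if_true, List.map_cons, List.foldl_cons]
      exact ih r _
    · rw [if_neg hc]
      simp only [hc, decide_false]
      exact ih r m
-- ---- assembly: A's grouped total = B's per-node total ----

theorem pvMain (N : Int) (ingredients : List (String × Int)) (M : Int)
    (magic_transformations : List (String × String))
    (hpre : Pre_calculate_minimum_cost N ingredients M magic_transformations) :
    calculate_minimum_cost N ingredients M magic_transformations
      = calculate_minimum_cost_alt N ingredients M magic_transformations := by
  obtain ⟨hNlen, hmt0⟩ := hpre
  set dic := pvDicA ingredients with hdic_def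
  set price := ingredients.map (fun ing => ing.2) with hprice_def
  set L0 := PySem.List.pyRange 0 N 1 with hL0_def
  have hdic_nonneg : ∀ s i, dic.get? s = some i → 0 ≤ i := by
    intro s i h
    rw [hdic_def, pvDic_get] at h
    exact pvNameIdx_nonneg h
  have hmt : ∀ q ∈ magic_transformations,
      (∃ i, dic.get? q.1 = some i ∧ i < N) ∧ (∃ j, dic.get? q.2 = some j ∧ j < N) := by
    intro q hq
    obtain ⟨h1, h2⟩ := hmt0 q hq
    rw [pvIdxOK] at h1 h2
    constructor
    · cases ho : pvNameIdx ingredients q.1 with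
      | none => rw [ho] at h1; cases h1
      | some i =>
        rw [ho] at h1
        exact ⟨i, by rw [hdic_def, pvDic_get, ho], by simpa using h1⟩
    · cases ho : pvNameIdx ingredients q.2 with
      | none => rw [ho] at h2; cases h2
      | some j =>
        rw [ho] at h2
        exact ⟨j, by rw [hdic_def, pvDic_get, ho], by simpa using h2⟩
  obtain ⟨pstar, comp, hAedges, hBrelabel, hInv⟩ :=
    pvEdges_sim dic hdic_nonneg magic_transformations L0 L0 (pvInit N) hmt
  obtain ⟨hForest, hclen, hiff⟩ := hInv
  have hplen : pstar.length = N.toNat := hForest.1.1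
  have hpricelen : price.length = ingredients.length := by rw [hprice_def]; simp
  have hL0mem : ∀ i ∈ L0, 0 ≤ i ∧ i < N ∧ i.toNat < price.length := by
    intro i hi
    have := (PySem.List.mem_pyRange_one).mp (hL0_def ▸ hi)
    refine ⟨this.1, this.2, ?_⟩
    rw [hpricelen]; omega
  set R := pvRoot N.toNat pstar with hR_def
  set pr := fun j : Int => pvG price j with hpr_def
  -- A's run
  have hGroup := pvGroupA_run price pstar hForest L0 pstar PySem.Dict.empty hForest
    (fun z rz k _ _ hd => ⟨k, hd⟩) hL0mem
  set G := L0.foldl (fun g i => g.insert (R i) (pvUpdVal pr R g i)) PySem.Dict.empty with hG_def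
  have hnodup : G.keys.Nodup := by
    rw [hG_def]
    exact PySem.Dict.nodup_keys_foldl_insert_key L0 R (fun g i => pvUpdVal pr R g i)
      PySem.Dict.empty (by simp [PySem.Dict.keys_empty])
  have hget : ∀ r, G.get? r = if (L0.filter (fun i => R i = r)) = [] then none
      else some (pvMn pr R L0 r, ((L0.filter (fun i => R i = r)).length : Int)) := by
    intro r
    rw [hG_def]
    exact pvSpec_get pr R L0 r
  have hKmem : ∀ r, r ∈ G.keys ↔ ∃ i ∈ L0, R i = r := by
    intro r
    constructor
    · intro h
      by_contra hc
      have hfil : L0.filter (fun i => R i = r) = [] := by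
        rw [List.filter_eq_nil_iff]
        intro a ha
        simp only [decide_eq_true_eq]
        exact fun he => hc ⟨a, ha, he⟩
      have := hget r
      rw [if_pos hfil] at this
      exact ((PySem.Dict.get?_eq_none_iff_not_mem_keys G r).mp this) h
    · intro ⟨i, hi, he⟩
      by_contra hc
      have hnone := (PySem.Dict.get?_eq_none_iff_not_mem_keys G r).mpr hc
      rw [hget r] at hnone
      split_ifs at hnone with hfil
      have := List.filter_eq_nil_iff.mp hfil i hi
      simp [he] at this
  -- A's value = Σ over keys of min*count
  have hAval : (G.items.map (fun q => q.2.1 * q.2.2)).sum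
      = (G.keys.map (fun k => pvMn pr R L0 k * ((L0.filter (fun i => R i = k)).length : Int))).sum := by
    rw [PySem.Dict.items_eq_map_keys G hnodup (0, 0), List.map_map]
    apply congrArg
    apply List.map_congr_left
    intro k hk
    have hne : ¬ (L0.filter (fun i => R i = k)) = [] := by
      rcases (hKmem k).mp hk with ⟨i, hi, he⟩
      intro hfil
      have := List.filter_eq_nil_iff.mp hfil i hi
      simp [he] at this
    have : G.getD k (0, 0) = (pvMn pr R L0 k, ((L0.filter (fun i => R i = k)).length : Int)) := by
      rw [PySem.Dict.getD_eq_get?_getD, hget k, if_neg hne]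
      rfl
    simp [this]
  -- B's inner minimum = the class minimum
  have hBmin : ∀ i ∈ L0,
      L0.foldl (fun m j => if pvG comp j = pvG comp i
        then (if pvG price j < m then pvG price j else m) else m) (pvG price i)
      = pvMn pr R L0 (R i) := by
    intro i hi
    obtain ⟨hi0, hiN, hip⟩ := hL0mem i hi
    have hstep : ∀ m : Int, ∀ j ∈ L0, (if pvG comp j = pvG comp i
          then (if pvG price j < m then pvG price j else m) else m)
        = (if R j = R i then (if pr j < m then pr j else m) else m) := by
      intro m j hj
      obtain ⟨hj0, hjN, hjp⟩ := hL0mem j hj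
      obtain ⟨ri, ki, hdi⟩ := hForest.2 i hi0 hiN
      obtain ⟨rj, kj, hdj⟩ := hForest.2 j hj0 hjN
      have hRi : R i = ri := hR_def ▸ pvRoot_eq hdi N.toNat (pvRtD_bound hForest.1 hdi hi0 hiN)
      have hRj : R j = rj := hR_def ▸ pvRoot_eq hdj N.toNat (pvRtD_bound hForest.1 hdj hj0 hjN)
      have hiffji := hiff j i rj ri kj ki hj0 hjN hi0 hiN hdj hdi
      rw [hRi, hRj]
      exact if_congr (Iff.symm hiffji) rfl rfl
    have hfold : L0.foldl (fun m j => if pvG comp j = pvG comp i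
          then (if pvG price j < m then pvG price j else m) else m) (pvG price i)
        = L0.foldl (fun m j => if R j = R i then (if pr j < m then pr j else m) else m) (pvG price i) := by
      exact PySem.List.foldl_congr_mem L0 _ _ _ (fun m j hj => hstep m j hj)
    rw [hfold, pvClassMin R pr L0 (R i) (pvG price i)]
    -- i belongs to its own class, so starting from price[i] gives the class minimum
    have hifil : i ∈ L0.filter (fun j => R j = R i) := by
      rw [List.mem_filter]
      exact ⟨hi, by simp⟩
    cases hfl : L0.filter (fun j => R j = R i) with
    | nil => rw [hfl] at hifil; cases hifil
    | cons b rest =>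
      have hmem : pvG price i ∈ (b :: rest).map pr := by
        rw [← hfl]
        exact List.mem_map.mpr ⟨i, hifil, rfl⟩
      rw [pvIfLt_eq_min]
      have := pvFoldlMin_mem (l := (b :: rest).map pr) (b := pr b) (rest := rest.map pr)
        (by rw [List.map_cons]) hmem
      rw [this, pvMn_eq, hfl, List.map_cons]
      dsimp only
      rw [pvIfLt_eq_min]
  -- B's run
  have hrange : ∀ j ∈ L0, 0 ≤ j ∧ j.toNat < comp.length ∧ j.toNat < price.length := by
    intro j hj
    obtain ⟨hj0, hjN, hjp⟩ := hL0mem j hj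
    exact ⟨hj0, by omega, hjp⟩
  have hTotal := pvTotalB_run comp price N hrange L0 0 hrange
  -- final identity
  have hsum : (G.items.map (fun q => q.2.1 * q.2.2)).sum
      = 0 + (L0.map (fun i => L0.foldl (fun m j => if pvG comp j = pvG comp i
          then (if pvG price j < m then pvG price j else m) else m) (pvG price i))).sum := by
    rw [hAval, List.map_congr_left hBmin]
    rw [pvPartitionSum R (pvMn pr R L0) L0 G.keys (hL0_def ▸ PySem.List.nodup_pyRange_one 0 N) hnodup hKmem]
    ring
  -- put the two programs together
  simp only [calculate_minimum_cost, calculate_minimum_cost_alt]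
  rw [pvDicB_eq ingredients, ← hdic_def, hAedges, hBrelabel]
  dsimp only
  rw [hGroup, hTotal]
  dsimp only
  rw [hsum]


-- ===== VERDICT (by name: the statement is the Claim_ definition above) =====
theorem calculate_minimum_cost_spec : Claim_equal_calculate_minimum_cost := by
  intro N ingredients M magic_transformations _ hpre
  exact pvMain N ingredients M magic_transformations hpre
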